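-- pv_equiv track=rewrite | github.com/jcordovilla/pepe | agentic/agents/v2/qa_agent.py | _is_bot_capability_question
-- ===== SOURCE A (Python) =====
-- def _is_bot_capability_question(query: str) -> bool:
--     """Check if the query is asking about the bot's capabilities."""
--     query_lower = query.lower()
--
--     # Keywords that indicate questions about bot capabilities
--     capability_keywords = [
--         "what can you do",
--         "what do you do",
--         "what are your capabilities",
--         "what are you capable of",
--         "what type of tasks",
--         "what tasks can you",
--         "how can you help",
--         "what are your features",
--         "what are your functions",
--         "what can you help with",
--         "what are you able to do",
--         "what are your skills",
--         "what are your abilities",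
--         "what can you perform",
--         "what are you designed to do",
--         "what is your purpose",
--         "what do you specialize in",
--         "what are your strengths",
--         "what can you assist with",
--         "what are your tools"
--     ]
--
--     return any(keyword in query_lower for keyword in capability_keywords)
-- ===== SOURCE B (Python) =====
-- _CAPABILITY_KEYWORDS = [
--     "what can you do",
--     "what do you do",
--     "what are your capabilities",
--     "what are you capable of",
--     "what type of tasks",
--     "what tasks can you",
--     "how can you help",
--     "what are your features",
--     "what are your functions",
--     "what can you help with",
--     "what are you able to do",
--     "what are your skills",
--     "what are your abilities",
--     "what can you perform",
--     "what are you designed to do",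
--     "what is your purpose",
--     "what do you specialize in",
--     "what are your strengths",
--     "what can you assist with",
--     "what are your tools",
-- ]
--
--
-- def _is_bot_capability_question(query: str) -> bool:
--     """Check if the query is asking about the bot's capabilities.
--
--     Single position-major scan: walk the lowercased query once and at each
--     position test whether some capability phrase starts there."""
--     q = query.lower()
--     return any(
--         any(q.startswith(kw, i) for kw in _CAPABILITY_KEYWORDS)
--         for i in range(len(q) + 1)
--     )
-- ===== Notes on version B (the rewrite author's own statement) =====
-- stated objective: alternative
-- what changed: Replaces the phrase-major loop of independent substring-membership searches by one position-major scan of the lowercased query that tests each position once for a phrase prefix (startswith with an offset).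
import Mathlib
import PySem

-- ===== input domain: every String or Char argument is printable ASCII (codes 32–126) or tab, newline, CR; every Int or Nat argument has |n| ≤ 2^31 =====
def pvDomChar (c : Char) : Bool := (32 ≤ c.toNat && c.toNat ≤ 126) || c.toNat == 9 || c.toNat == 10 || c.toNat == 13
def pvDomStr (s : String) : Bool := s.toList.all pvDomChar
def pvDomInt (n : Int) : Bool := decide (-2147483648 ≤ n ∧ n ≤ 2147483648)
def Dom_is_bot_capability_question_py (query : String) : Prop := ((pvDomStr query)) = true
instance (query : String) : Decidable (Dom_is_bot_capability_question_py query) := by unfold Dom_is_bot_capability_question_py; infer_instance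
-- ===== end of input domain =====

-- B replaces A's phrase-major loop of substring searches by a single position-major
-- scan of the lowercased query, testing each position once for a phrase prefix (alternative; not claimed faster).

-- ===== PORT A =====
def pvCapabilityKeywordsA : List String := [
  "what can you do",
  "what do you do",
  "what are your capabilities",
  "what are you capable of",
  "what type of tasks",
  "what tasks can you",
  "how can you help",
  "what are your features",
  "what are your functions",
  "what can you help with",
  "what are you able to do",
  "what are your skills",
  "what are your abilities",
  "what can you perform",
  "what are you designed to do",
  "what is your purpose",
  "what do you specialize in",
  "what are your strengths",
  "what can you assist with",
  "what are your tools"]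

def is_bot_capability_question_py (query : String) : Bool :=
  let query_lower := PySem.Str.lower query
  pvCapabilityKeywordsA.any (fun keyword => PySem.Str.isIn keyword query_lower)

-- ===== PORT B =====
def pvCapabilityKeywordsB : List (List Char) :=
  (["what can you do", "what do you do", "what are your capabilities",
    "what are you capable of", "what type of tasks", "what tasks can you",
    "how can you help", "what are your features", "what are your functions",
    "what can you help with", "what are you able to do", "what are your skills",
    "what are your abilities", "what can you perform", "what are you designed to do",
    "what is your purpose", "what do you specialize in", "what are your strengths",
    "what can you assist with", "what are your tools"] : List String).map String.toList

-- position-major scan: at the current position test every phrase as a prefix,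
-- then advance one character; the [] case is position len(q) of Python's range(len(q)+1).
def pvScanB (cs : List Char) : Bool :=
  if pvCapabilityKeywordsB.any (fun kw => PySem.Chars.startswith cs kw) then true
  else
    match cs with
    | [] => false
    | _ :: t => pvScanB t

def is_bot_capability_question_py_alt (query : String) : Bool :=
  pvScanB (PySem.Str.lower query).toList

-- ===== PRECONDITION & SPEC =====
def Spec_is_bot_capability_question_py (query : String) (out : Bool) : Prop := out = is_bot_capability_question_py_alt query
instance (query : String) (out : Bool) : Decidable (Spec_is_bot_capability_question_py query out) := by unfold Spec_is_bot_capability_question_py; infer_instance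

-- ===== CLAIM (what is proved, stated in full; the proofs are below) =====
def Claim_equal_is_bot_capability_question_py : Prop := ∀ (query : String), Dom_is_bot_capability_question_py query → Spec_is_bot_capability_question_py query (is_bot_capability_question_py query)

-- ===== LEMMAS AND PROOFS =====

theorem pvScanB_iff (cs : List Char) :
    pvScanB cs = true ↔ ∃ kw ∈ pvCapabilityKeywordsB, kw <:+: cs := by
  induction cs with
  | nil =>
      rw [pvScanB]
      simp only [List.any_eq_true, PySem.Chars.startswith_iff]
      constructor
      · intro h
        split at h
        · rename_i hx
          obtain ⟨kw, hmem, hp⟩ := hx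
          exact ⟨kw, hmem, hp.isInfix⟩
        · exact absurd h (by simp)
      · rintro ⟨kw, hmem, hinf⟩
        have hk : kw = [] := by simpa using hinf
        split
        · rfl
        · rename_i hx
          exact absurd ⟨kw, hmem, by simp [hk]⟩ hx
  | cons c t ih =>
      rw [pvScanB]
      simp only [List.any_eq_true, PySem.Chars.startswith_iff]
      constructor
      · intro h
        split at h
        · rename_i hx
          obtain ⟨kw, hmem, hp⟩ := hx
          exact ⟨kw, hmem, hp.isInfix⟩
        · obtain ⟨kw, hmem, hinf⟩ := ih.mp h
          exact ⟨kw, hmem, List.infix_cons hinf⟩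
      · rintro ⟨kw, hmem, hinf⟩
        split
        · rfl
        · rename_i hx
          rcases List.infix_cons_iff.mp hinf with hp | hinf'
          · exact absurd ⟨kw, hmem, hp⟩ hx
          · exact ih.mpr ⟨kw, hmem, hinf'⟩

theorem pvKB_eq : pvCapabilityKeywordsB = pvCapabilityKeywordsA.map String.toList := rfl

theorem pv_eq (query : String) :
    is_bot_capability_question_py query = is_bot_capability_question_py_alt query := by
  unfold is_bot_capability_question_py is_bot_capability_question_py_alt
  apply Bool.eq_iff_iff.mpr
  rw [List.any_eq_true, pvScanB_iff, pvKB_eq]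
  constructor
  · rintro ⟨s, hs, hin⟩
    exact ⟨s.toList, List.mem_map_of_mem hs, (PySem.Str.isIn_iff_infix _ _).mp hin⟩
  · rintro ⟨kw, hkw, hinf⟩
    obtain ⟨s, hs, rfl⟩ := List.mem_map.mp hkw
    exact ⟨s, hs, (PySem.Str.isIn_iff_infix _ _).mpr hinf⟩

-- ===== VERDICT (by name: the statement is the Claim_ definition above) =====
theorem is_bot_capability_question_py_spec : Claim_equal_is_bot_capability_question_py := by
  intro query _
  exact pv_eq query
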